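-- pv_equiv track=rewrite | github.com/kevinkim-dev/self_study | programmers/월간 코드 챌린지 시즌1/L1_3진법뒤집기.py | solution
-- ===== SOURCE A (Python) =====
-- def solution(n):
--     bits = list()
--     while n:
--         bits.append(n % 3)
--         n //= 3
--     answer = 0
--     for i in range(len(bits)):
--         answer += bits[-i-1]*3**(i)
--     return answer
-- ===== SOURCE B (Python) =====
-- def solution(n):
--     answer = 0
--     while n:
--         answer = answer * 3 + n % 3
--         n //= 3
--     return answer
-- ===== Notes on version B (the rewrite author's own statement) =====
-- stated objective: simpler
-- what changed: Replaced A's two phases (build a digit list, then reconstruct with bits[-i-1]*3**i over a range) by a single Horner-style accumulator loop that reverses the ternary digits in one pass with no intermediate list and no power computation.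
import Mathlib
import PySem

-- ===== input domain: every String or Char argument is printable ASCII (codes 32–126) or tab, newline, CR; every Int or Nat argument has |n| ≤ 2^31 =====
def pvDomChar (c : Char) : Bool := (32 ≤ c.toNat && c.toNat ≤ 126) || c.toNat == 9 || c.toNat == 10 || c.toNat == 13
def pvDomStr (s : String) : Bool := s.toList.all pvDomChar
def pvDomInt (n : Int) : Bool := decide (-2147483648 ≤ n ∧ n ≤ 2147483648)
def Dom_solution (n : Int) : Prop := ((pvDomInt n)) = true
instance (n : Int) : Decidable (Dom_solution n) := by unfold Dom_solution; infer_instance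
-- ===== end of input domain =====

-- B replaces A's two passes (digit list, then bits[-i-1]*3**i reconstruction) by one
-- Horner accumulator loop; objective: simpler.

-- ===== PORT A =====
-- the 'while n' loop of A; guard written as 0 < n, exact wherever Python returns (Python diverges for n < 0; there the port returns the loop's initial accumulator)
def bitsLoop (n : Int) (bits : List Int) : List Int :=
  if 0 < n then bitsLoop (PySem.Int.floordiv n 3) (bits ++ [PySem.Int.mod n 3]) else bits
termination_by n.toNat
decreasing_by
  rename_i h
  rw [PySem.Int.floordiv_eq_ediv_of_pos (by omega)]
  omega

def solution (n : Int) : Int :=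
  let bits := bitsLoop n []
  (PySem.List.pyRange 0 bits.length 1).foldl
    (fun answer i => answer + (PySem.List.pyGet? bits (-i-1)).getD 0 * 3 ^ i.toNat) 0

-- ===== PORT B =====
-- the 'while n' loop of B; guard written as 0 < n, exact wherever Python returns (Python diverges for n < 0; there the port returns the loop's initial accumulator)
def hornerLoop (n answer : Int) : Int :=
  if 0 < n then hornerLoop (PySem.Int.floordiv n 3) (answer * 3 + PySem.Int.mod n 3) else answer
termination_by n.toNat
decreasing_by
  rename_i h
  rw [PySem.Int.floordiv_eq_ediv_of_pos (by omega)]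
  omega

def solution_alt (n : Int) : Int := hornerLoop n 0

-- ===== PRECONDITION & SPEC =====
def Spec_solution (n : Int) (out : Int) : Prop := out = solution_alt n
instance (n : Int) (out : Int) : Decidable (Spec_solution n out) := by unfold Spec_solution; infer_instance

-- ===== CLAIM (what is proved, stated in full; the proofs are below) =====
def Claim_equal_solution : Prop := ∀ (n : Int), Dom_solution n → Spec_solution n (solution n)

-- ===== LEMMAS AND PROOFS =====

-- ternary digits of n, least significant first
def pvDigits (n : Int) : List Int :=
  if 0 < n then PySem.Int.mod n 3 :: pvDigits (PySem.Int.floordiv n 3) else []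
termination_by n.toNat
decreasing_by
  rename_i h
  rw [PySem.Int.floordiv_eq_ediv_of_pos (by omega)]
  omega

theorem bitsLoop_eq (n : Int) (bits : List Int) : bitsLoop n bits = bits ++ pvDigits n := by
  fun_induction bitsLoop n bits with
  | case1 n bits h ih =>
      rw [pvDigits, if_pos h, ih]
      simp
  | case2 n bits h =>
      rw [pvDigits, if_neg h]
      simp

theorem hornerLoop_eq (n acc : Int) :
    hornerLoop n acc = (pvDigits n).foldl (fun a d => a * 3 + d) acc := by
  fun_induction hornerLoop n acc with
  | case1 n acc h ih =>
      rw [pvDigits, if_pos h, ih]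
      simp
  | case2 n acc h =>
      rw [pvDigits, if_neg h]
      simp

theorem horner_acc (l : List Int) (acc : Int) :
    l.foldl (fun a d => a * 3 + d) acc
      = acc * 3 ^ l.length + l.foldl (fun a d => a * 3 + d) 0 := by
  induction l generalizing acc with
  | nil => simp
  | cons d t ih =>
      simp only [List.foldl_cons, List.length_cons]
      rw [ih (acc * 3 + d), ih (0 * 3 + d)]
      ring

theorem pyGet?_cons_neg (d : Int) (t : List Int) (i : Int)
    (h0 : 0 ≤ i) (h1 : i < t.length) :
    PySem.List.pyGet? (d :: t) (-i-1) = PySem.List.pyGet? t (-i-1) := by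
  have hnn : ¬ (0 ≤ -i - 1) := by omega
  simp only [PySem.List.pyGet?, PySem.List.pyIdx?, List.length_cons, if_neg hnn]
  rw [if_pos (show -((t.length + 1 : Nat) : Int) ≤ -i - 1 by push_cast; omega),
      if_pos (show -((t.length : Nat) : Int) ≤ -i - 1 by omega)]
  have hk : (-(-i - 1)).toNat = i.toNat + 1 := by omega
  simp only [Option.bind, hk]
  have hm : t.length + 1 - (i.toNat + 1) = (t.length - (i.toNat + 1)) + 1 := by omega
  rw [hm, List.getElem?_cons_succ]

theorem key (l : List Int) :
    (PySem.List.pyRange 0 (l.length : Int) 1).foldl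
        (fun answer i => answer + (PySem.List.pyGet? l (-i-1)).getD 0 * 3 ^ i.toNat) 0
      = l.foldl (fun a d => a * 3 + d) 0 := by
  induction l with
  | nil => simp [PySem.List.pyRange_one_eq_nil]
  | cons d t ih =>
      have hsplit : PySem.List.pyRange 0 ((t.length : Int) + 1) 1
          = PySem.List.pyRange 0 (t.length : Int) 1 ++ [(t.length : Int)] := by
        exact PySem.List.pyRange_one_succ_right (by positivity)
      have hcast : ((d :: t).length : Int) = (t.length : Int) + 1 := by simp
      rw [hcast, hsplit, List.foldl_append]
      have hcongr :
          (PySem.List.pyRange 0 (t.length : Int) 1).foldl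
              (fun answer i => answer + (PySem.List.pyGet? (d :: t) (-i-1)).getD 0 * 3 ^ i.toNat) 0
            = (PySem.List.pyRange 0 (t.length : Int) 1).foldl
              (fun answer i => answer + (PySem.List.pyGet? t (-i-1)).getD 0 * 3 ^ i.toNat) 0 := by
        apply PySem.List.foldl_congr_mem
        intro a i hi
        have hmem := (PySem.List.mem_pyRange_one).mp hi
        rw [pyGet?_cons_neg d t i (by omega) (by omega)]
      rw [hcongr, ih]
      have hlast : PySem.List.pyGet? (d :: t) (-(t.length : Int) - 1) = some d := by
        have h1 : -(t.length : Int) - 1 = -(((t.length + 1 : Nat) : Int)) := by push_cast; ring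
        rw [h1, PySem.List.pyGet?_neg_natCast (d :: t) (t.length + 1) (by omega) (by simp)]
        simp
      simp only [List.foldl]
      rw [hlast]
      simp only [Option.getD_some]
      rw [horner_acc t (0 * 3 + d)]
      have hcn : ((t.length : Int)).toNat = t.length := by omega
      rw [hcn]
      ring

-- ===== VERDICT (by name: the statement is the Claim_ definition above) =====
theorem solution_spec : Claim_equal_solution := by
  intro n _
  unfold Spec_solution solution solution_alt
  rw [hornerLoop_eq, bitsLoop_eq]
  simpa using key (pvDigits n)
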